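-- pv_equiv track=rewrite | github.com/zhangjianyong66/OpenSpace | openspace/grounding/backends/mcp/installer.py | _extract_python_package
-- ===== SOURCE A (Python) =====
-- from typing import Callable, Awaitable, Optional, Dict, List
--
-- def _extract_python_package(args: List[str]) -> Optional[str]:
--     """Extract package name from uvx arguments.
--
--     Args:
--         args: uvx arguments list, e.g. ["--from", "office-powerpoint-mcp-server", "ppt_mcp_server"]
--               or ["--with", "mcp==1.9.0", "sitemap-mcp-server"]
--               or ["arxiv-mcp-server", "--storage-path", "./path"]
--
--     Returns:
--         Package name or None
--     """
--     # Find --from parameter (this is the package to install)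
--     for i, arg in enumerate(args):
--         if arg == "--from" and i + 1 < len(args):
--             return args[i + 1]
--
--     # Skip option flags and their values, find the main package (FIRST positional arg)
--     # Options that take a value: --with, --python, --from, --storage-path, etc.
--     options_with_value = {"--with", "--from", "--python", "-p", "--storage-path"}
--     skip_next = False
--
--     for arg in args:
--         if skip_next:
--             skip_next = False
--             continue
--         if arg in options_with_value:
--             skip_next = True
--             continue
--         if arg.startswith("-"):
--             # Other flags without values (or unknown options with values)
--             # Also skip the next arg if it looks like an option value (doesn't start with -)
--             continue
--         # First non-option argument is the package name
--         return arg
--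
--     return None
-- ===== SOURCE B (Python) =====
-- def _extract_python_package(args):
--     """Single pass over enumerate(args) latching both candidates: the first
--     --from value and the first positional argument; pick --from if seen."""
--     options_with_value = {"--with", "--from", "--python", "-p", "--storage-path"}
--     from_value = None
--     first_positional = None
--     skip_next = False
--     for i, arg in enumerate(args):
--         if from_value is None and arg == "--from" and i + 1 < len(args):
--             from_value = args[i + 1]
--         if skip_next:
--             skip_next = False
--         elif arg in options_with_value:
--             skip_next = True
--         elif arg.startswith("-"):
--             pass
--         elif first_positional is None:
--             first_positional = arg
--     return from_value if from_value is not None else first_positional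
-- ===== Notes on version B (the rewrite author's own statement) =====
-- stated objective: alternative
-- what changed: Replaced A's two sequential scans (an early-return --from search, then a second pass with skip state for the first positional) by a single enumerate pass that latches both candidates (first --from value and first positional) in two variables and picks between them after the loop.
import Mathlib
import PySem

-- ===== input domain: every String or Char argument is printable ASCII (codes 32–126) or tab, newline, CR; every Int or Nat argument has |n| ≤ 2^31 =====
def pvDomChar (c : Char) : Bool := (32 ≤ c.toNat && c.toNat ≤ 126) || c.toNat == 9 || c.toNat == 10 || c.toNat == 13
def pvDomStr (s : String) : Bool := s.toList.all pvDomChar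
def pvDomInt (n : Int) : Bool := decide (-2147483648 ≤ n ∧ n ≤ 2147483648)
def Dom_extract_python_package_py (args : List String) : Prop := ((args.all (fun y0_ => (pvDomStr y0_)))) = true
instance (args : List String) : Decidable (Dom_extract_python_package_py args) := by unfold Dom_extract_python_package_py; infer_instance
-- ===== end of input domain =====

-- B fuses A's two sequential scans into one enumerate pass latching both candidate answers ("alternative": same cost, different shape).

-- ===== PORT A =====
-- the set literal {"--with", "--from", "--python", "-p", "--storage-path"}
def pvOptsWithValue : PySem.Set String :=
  PySem.Set.ofList ["--with", "--from", "--python", "-p", "--storage-path"]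

-- first loop: for i, arg in enumerate(args): if arg == "--from" and i + 1 < len(args): return args[i + 1]
def pvAFromScan (args : List String) : List (Int × String) → Option String
  | [] => none
  | (i, arg) :: rest =>
    if arg == "--from" && decide (i + 1 < (args.length : Int)) then
      PySem.List.pyGet? args (i + 1)
    else pvAFromScan args rest

-- second loop, with skip_next state, over the raw args
def pvAPosScan : Bool → List String → Option String
  | _, [] => none
  | true, _ :: rest => pvAPosScan false rest
  | false, arg :: rest =>
    if PySem.Set.contains pvOptsWithValue arg then pvAPosScan true rest
    else if PySem.Str.startswith arg "-" then pvAPosScan false rest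
    else some arg

def extract_python_package_py (args : List String) : Option String :=
  match pvAFromScan args (PySem.List.enumerate args) with
  | some v => some v
  | none => pvAPosScan false args

-- ===== PORT B =====
-- one step of B's single loop; state = (from_value, first_positional, skip_next)
def pvBStep (args : List String) (st : Option String × Option String × Bool)
    (p : Int × String) : Option String × Option String × Bool :=
  let fv := if st.1 == none && p.2 == "--from" && decide (p.1 + 1 < (args.length : Int)) then
              PySem.List.pyGet? args (p.1 + 1)
            else st.1
  if st.2.2 then (fv, st.2.1, false)
  else if PySem.Set.contains pvOptsWithValue p.2 then (fv, st.2.1, true)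
  else if PySem.Str.startswith p.2 "-" then (fv, st.2.1, false)
  else (fv, (if st.2.1 == none then some p.2 else st.2.1), false)

def extract_python_package_py_alt (args : List String) : Option String :=
  let st := (PySem.List.enumerate args).foldl (pvBStep args) (none, none, false)
  match st.1 with
  | some v => some v
  | none => st.2.1

-- ===== PRECONDITION & SPEC =====
def Spec_extract_python_package_py (args : List String) (out : Option String) : Prop := out = extract_python_package_py_alt args
instance (args : List String) (out : Option String) : Decidable (Spec_extract_python_package_py args out) := by unfold Spec_extract_python_package_py; infer_instance

-- ===== CLAIM (what is proved, stated in full; the proofs are below) =====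
def Claim_equal_extract_python_package_py : Prop := ∀ (args : List String), Dom_extract_python_package_py args → Spec_extract_python_package_py args (extract_python_package_py args)

-- ===== LEMMAS AND PROOFS =====

-- the components of one B step, read off separately
theorem pvBStep_fst (args : List String) (st : Option String × Option String × Bool)
    (p : Int × String) :
    (pvBStep args st p).1 =
      if (st.1 == none && p.2 == "--from" && decide (p.1 + 1 < (args.length : Int))) = true then
        PySem.List.pyGet? args (p.1 + 1)
      else st.1 := by
  simp only [pvBStep]
  split_ifs <;> rfl

theorem pvBStep_snd (args : List String) (st : Option String × Option String × Bool)
    (p : Int × String) :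
    (pvBStep args st p).2 =
      if st.2.2 then (st.2.1, false)
      else if PySem.Set.contains pvOptsWithValue p.2 then (st.2.1, true)
      else if PySem.Str.startswith p.2 "-" then (st.2.1, false)
      else ((if st.2.1 == none then some p.2 else st.2.1), false) := by
  simp only [pvBStep]
  split_ifs <;> rfl

-- the from_value component of B's fold latches exactly the result of A's first scan
theorem pvFold_fst (args : List String) :
    ∀ (xs : List String) (s : Int), 0 ≤ s → ∀ (fv fp : Option String) (sk : Bool),
      ((PySem.List.enumerate xs s).foldl (pvBStep args) (fv, fp, sk)).1
        = fv.or (pvAFromScan args (PySem.List.enumerate xs s)) := by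
  intro xs
  induction xs with
  | nil => intro s _ fv fp sk; simp [PySem.List.enumerate_nil, pvAFromScan]
  | cons arg rest ih =>
    intro s hs fv fp sk
    rw [PySem.List.enumerate_cons]
    simp only [List.foldl_cons, pvAFromScan]
    rcases h' : pvBStep args (fv, fp, sk) (s, arg) with ⟨fv', fp', sk'⟩
    have hfst := pvBStep_fst args (fv, fp, sk) (s, arg)
    rw [h'] at hfst
    simp only at hfst
    rw [ih (s + 1) (by omega) fv' fp' sk']
    by_cases hc : (arg == "--from" && decide (s + 1 < (args.length : Int))) = true
    · rw [if_pos hc]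
      cases fv with
      | none =>
        have hlen : s + 1 < (args.length : Int) := by
          simp only [Bool.and_eq_true, decide_eq_true_eq] at hc; exact hc.2
        have hsome : PySem.List.pyGet? args (s + 1) = some (args[(s + 1).toNat]) := by
          rw [PySem.List.pyGet?_of_nonneg_of_lt args (by omega) hlen]
          exact List.getElem?_eq_getElem (by omega)
        have : fv' = PySem.List.pyGet? args (s + 1) := by
          rw [hfst, if_pos (by simp [hc])]
        rw [this, hsome]
        simp [Option.some_or]
      | some w =>
        have : fv' = some w := by
          rw [hfst, if_neg (by simp)]
        rw [this]
        simp [Option.some_or]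
    · rw [if_neg hc]
      have : fv' = fv := by
        rw [hfst]
        rcases Bool.eq_false_iff.2 hc with h
        rw [Bool.and_assoc, h, Bool.and_false, if_neg (by simp)]
      rw [this]

-- the first_positional component of B's fold latches exactly the result of A's second scan
theorem pvFold_snd (args : List String) :
    ∀ (xs : List String) (s : Int) (fv fp : Option String) (sk : Bool),
      ((PySem.List.enumerate xs s).foldl (pvBStep args) (fv, fp, sk)).2.1
        = fp.or (pvAPosScan sk xs) := by
  intro xs
  induction xs with
  | nil => intro s fv fp sk; cases sk <;> simp [PySem.List.enumerate_nil, pvAPosScan]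
  | cons arg rest ih =>
    intro s fv fp sk
    rw [PySem.List.enumerate_cons]
    simp only [List.foldl_cons]
    rcases h' : pvBStep args (fv, fp, sk) (s, arg) with ⟨fv', fp', sk'⟩
    have hsnd := pvBStep_snd args (fv, fp, sk) (s, arg)
    rw [h'] at hsnd
    simp only at hsnd
    rw [ih (s + 1) fv' fp' sk']
    cases sk with
    | true =>
      rw [if_pos rfl] at hsnd
      have h1 : fp' = fp := congrArg Prod.fst hsnd
      have h2 : sk' = false := congrArg Prod.snd hsnd
      rw [h1, h2]
      rfl
    | false =>
      rw [if_neg (by simp)] at hsnd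
      show fp'.or (pvAPosScan sk' rest) = fp.or (pvAPosScan false (arg :: rest))
      by_cases hin : PySem.Set.contains pvOptsWithValue arg = true
      · rw [if_pos hin] at hsnd
        have h1 : fp' = fp := congrArg Prod.fst hsnd
        have h2 : sk' = true := congrArg Prod.snd hsnd
        rw [h1, h2]
        simp only [pvAPosScan]
        rw [if_pos hin]
      · rw [if_neg hin] at hsnd
        by_cases hst : PySem.Str.startswith arg "-" = true
        · rw [if_pos hst] at hsnd
          have h1 : fp' = fp := congrArg Prod.fst hsnd
          have h2 : sk' = false := congrArg Prod.snd hsnd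
          rw [h1, h2]
          simp only [pvAPosScan]
          rw [if_neg hin, if_pos hst]
        · rw [if_neg hst] at hsnd
          have h1 : fp' = (if fp == none then some arg else fp) := congrArg Prod.fst hsnd
          have h2 : sk' = false := congrArg Prod.snd hsnd
          rw [h1, h2]
          have hpos : pvAPosScan false (arg :: rest) = some arg := by
            simp only [pvAPosScan]
            rw [if_neg hin, if_neg hst]
          rw [hpos]
          cases fp <;> simp [Option.some_or]

-- ===== VERDICT (by name: the statement is the Claim_ definition above) =====
theorem extract_python_package_py_spec : Claim_equal_extract_python_package_py := by
  intro args _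
  unfold Spec_extract_python_package_py extract_python_package_py extract_python_package_py_alt
  rcases h : (PySem.List.enumerate args).foldl (pvBStep args) (none, none, false) with ⟨fv, fp, sk⟩
  have h1 := pvFold_fst args args 0 le_rfl none none false
  have h2 := pvFold_snd args args 0 none none false
  rw [h] at h1 h2
  simp only [Option.none_or] at h1 h2
  simp only [h1, h2]
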